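-- pv_equiv track=rewrite | github.com/TsungLin716/Applied-Cryptography-Project | DecryptionDict1_method2/py/decrypt.py | get_sorted_char_count
-- ===== SOURCE A (Python) =====
-- def count_char_freq(sentence: str) -> dict:
--     d = {}
--     for c in sentence:
--         d[c] = d.get(c, 0) + 1
--     return d
--
-- def get_sorted_char_count(sentence: str) -> list:
--     dic = count_char_freq(sentence)
--     count = []
--     for c in dic.values():
--         count.append(c)
--
--     while len(count) < 27:
--         count.append(0)
--
--     count.sort(reverse=True)
--     return count
-- ===== SOURCE B (Python) =====
-- def get_sorted_char_count(sentence: str) -> list: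
--     # Sort the characters, then scan consecutive equal runs with two indices
--     # (no hash map); pad with zeros to length 27 and sort descending.
--     s = sorted(sentence)
--     counts = []
--     i, n = 0, len(s)
--     while i < n:
--         j = i + 1
--         while j < n and s[j] == s[i]:
--             j += 1
--         counts.append(j - i)
--         i = j
--     counts += [0] * (27 - len(counts))
--     counts.sort(reverse=True)
--     return counts
-- ===== Notes on version B (the rewrite author's own statement) =====
-- stated objective: alternative
-- what changed: B counts character frequencies by sorting the characters and scanning consecutive equal runs with two indices instead of building a hash-map counter, then pads to 27 in one concatenation instead of an append loop.
import Mathlib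
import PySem

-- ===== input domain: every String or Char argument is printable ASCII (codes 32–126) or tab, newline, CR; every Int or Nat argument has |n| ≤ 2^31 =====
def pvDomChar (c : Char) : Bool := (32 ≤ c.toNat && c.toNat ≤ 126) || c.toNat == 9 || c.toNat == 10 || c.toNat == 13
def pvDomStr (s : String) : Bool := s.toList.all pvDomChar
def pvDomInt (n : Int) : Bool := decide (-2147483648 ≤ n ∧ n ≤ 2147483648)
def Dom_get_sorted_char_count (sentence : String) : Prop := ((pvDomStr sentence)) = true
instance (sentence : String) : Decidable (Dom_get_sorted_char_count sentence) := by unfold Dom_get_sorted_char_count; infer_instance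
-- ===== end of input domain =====

-- B replaces A's hash-map counting by sort-then-scan of consecutive runs and the append-loop padding
-- by a single concatenation (objective: alternative; same results, proved equal below).

-- ===== PORT A =====
-- the 'while len(count) < 27: count.append(0)' loop of A
def pvPad (count : List Int) : List Int :=
  if count.length < 27 then pvPad (count ++ [0]) else count
termination_by 27 - count.length
decreasing_by simp only [List.length_append, List.length_cons, List.length_nil]; omega

def get_sorted_char_count (sentence : String) : List Int :=
  let dic := sentence.toList.foldl (fun d c => d.insert c (d.getD c 0 + 1)) PySem.Dict.empty
  let count := dic.values.foldl (fun acc v => acc ++ [v]) ([] : List Int)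
  PySem.List.sorted (pvPad count) (fun x => x) true

-- ===== PORT B =====
-- the outer while loop of B: each step consumes one run s[i..j) of equal characters
def pvRuns : List Char → List Int
  | [] => []
  | c :: rest =>
      (((rest.takeWhile (fun x => x == c)).length : Int) + 1) ::
        pvRuns (rest.dropWhile (fun x => x == c))
termination_by l => l.length
decreasing_by
  simp only [List.length_cons]
  have := List.length_dropWhile_le (fun x => x == c) rest
  omega

def get_sorted_char_count_alt (sentence : String) : List Int :=
  let s := PySem.List.sorted sentence.toList (fun c => c) false
  let counts := pvRuns s
  let counts := counts ++ List.replicate (27 - counts.length) 0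
  PySem.List.sorted counts (fun x => x) true

-- ===== PRECONDITION & SPEC =====
def Spec_get_sorted_char_count (sentence : String) (out : List Int) : Prop := out = get_sorted_char_count_alt sentence
instance (sentence : String) (out : List Int) : Decidable (Spec_get_sorted_char_count sentence out) := by unfold Spec_get_sorted_char_count; infer_instance

-- ===== CLAIM (what is proved, stated in full; the proofs are below) =====
def Claim_equal_get_sorted_char_count : Prop := ∀ (sentence : String), Dom_get_sorted_char_count sentence → Spec_get_sorted_char_count sentence (get_sorted_char_count sentence)

-- ===== LEMMAS AND PROOFS =====

lemma pvPad_eq (c : List Int) : pvPad c = c ++ List.replicate (27 - c.length) 0 := by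
  induction c using pvPad.induct with
  | case1 c h ih =>
      rw [pvPad]
      simp only [h, if_pos]
      rw [ih]
      have h27 : 27 - c.length = (27 - (c ++ [0]).length) + 1 := by
        simp only [List.length_append, List.length_cons, List.length_nil]; omega
      rw [h27, List.replicate_succ, List.append_assoc]
      rfl
  | case2 c h =>
      rw [pvPad]
      have h27 : 27 - c.length = 0 := by omega
      simp [h, h27]

lemma sorted_rev_eq_of_perm (xs ys : List Int) (h : xs.Perm ys) :
    PySem.List.sorted xs (fun x => x) true = PySem.List.sorted ys (fun x => x) true := by
  apply List.Perm.eq_of_pairwise (le := fun a b : Int => b ≤ a)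
  · intro a b _ _ h1 h2; exact le_antisymm h2 h1
  · exact PySem.List.sorted_pairwise_rev xs (fun x => x)
  · exact PySem.List.sorted_pairwise_rev ys (fun x => x)
  · exact ((PySem.List.sorted_perm xs _ true).trans h).trans (PySem.List.sorted_perm ys _ true).symm

lemma not_mem_dropWhile (c : Char) :
    ∀ (l : List Char), (∀ x ∈ l, c ≤ x) → l.Pairwise (· ≤ ·) →
      c ∉ l.dropWhile (fun x => x == c) := by
  intro l
  induction l with
  | nil => simp
  | cons x xs ih =>
      intro hle hp
      by_cases hx : x = c
      · subst hx
        simp only [List.dropWhile_cons, beq_self_eq_true, if_pos]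
        exact ih (fun y hy => List.rel_of_pairwise_cons hp hy) hp.of_cons
      · have hxc : (x == c) = false := by simp [hx]
        simp only [List.dropWhile_cons, hxc, Bool.false_eq_true, if_false]
        have hcx : c < x := lt_of_le_of_ne (hle x List.mem_cons_self) (fun h => hx h.symm)
        intro hmem
        rcases List.mem_cons.mp hmem with h | h
        · exact hx h.symm
        · exact absurd (List.rel_of_pairwise_cons hp h) (not_le_of_gt hcx)

lemma pvRuns_perm_counts :
    ∀ (n : Nat) (l : List Char), l.length ≤ n → l.Pairwise (· ≤ ·) →
      (pvRuns l).Perm ((PySem.Set.ofList l).map (fun k => (l.count k : Int))) := by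
  intro n
  induction n with
  | zero =>
      intro l hlen _
      have : l = [] := List.length_eq_zero_iff.mp (Nat.le_zero.mp hlen)
      subst this
      simp [pvRuns, PySem.Set.ofList]
  | succ n ih =>
      intro l hlen hp
      match l with
      | [] => simp [pvRuns, PySem.Set.ofList]
      | c :: rest =>
        have hrest : rest.takeWhile (fun x => x == c) ++ rest.dropWhile (fun x => x == c) = rest :=
          List.takeWhile_append_dropWhile
        set t := rest.takeWhile (fun x => x == c) with ht_def
        set d := rest.dropWhile (fun x => x == c) with hd_def
        have hc_le : ∀ x ∈ rest, c ≤ x := fun x hx => List.rel_of_pairwise_cons hp hx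
        have hp_rest : rest.Pairwise (· ≤ ·) := hp.of_cons
        have hcd : c ∉ d := not_mem_dropWhile c rest hc_le hp_rest
        have ht : ∀ x ∈ t, x = c := fun x hx => by
          have := List.mem_takeWhile_imp hx
          exact eq_of_beq this
        have hcount_c : (c :: rest).count c = t.length + 1 := by
          rw [← hrest, ← List.cons_append, List.count_append, List.count_cons_self,
              List.count_eq_zero.mpr hcd]
          have : t.count c = t.length := List.count_eq_length.mpr (fun b hb => (ht b hb).symm)
          omega
        have hp_d : d.Pairwise (· ≤ ·) := List.Pairwise.sublist (List.dropWhile_sublist _) hp_rest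
        have hlen_d : d.length ≤ n := by
          have h1 : d.length ≤ rest.length := by
            rw [hd_def]; exact List.length_dropWhile_le _ _
          simp only [List.length_cons] at hlen
          omega
        have ihd := ih d hlen_d hp_d
        have hset : (PySem.Set.ofList (c :: rest)).Perm (c :: PySem.Set.ofList d) := by
          rw [List.perm_ext_iff_of_nodup (PySem.Set.nodup_ofList _)
              (by simp only [List.nodup_cons, PySem.Set.mem_ofList]
                  exact ⟨hcd, PySem.Set.nodup_ofList d⟩)]
          intro a
          simp only [PySem.Set.mem_ofList, List.mem_cons, ← hrest, List.mem_append]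
          constructor
          · rintro (rfl | (hat | had))
            · exact Or.inl rfl
            · exact Or.inl (ht a hat)
            · exact Or.inr had
          · rintro (rfl | had)
            · exact Or.inl rfl
            · exact Or.inr (Or.inr had)
        have hck : ∀ k ∈ PySem.Set.ofList d, ((c :: rest).count k : Int) = (d.count k : Int) := by
          intro k hk
          have hkd : k ∈ d := (PySem.Set.mem_ofList d k).mp hk
          have hkc : k ≠ c := fun h => hcd (h ▸ hkd)
          have hkt : t.count k = 0 := List.count_eq_zero.mpr (fun hkt => hkc (ht k hkt))
          have hc0 : (c :: rest).count k = d.count k := by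
            rw [← hrest, ← List.cons_append, List.count_append]
            rw [List.count_cons_of_ne (Ne.symm hkc), hkt]; omega
          rw [hc0]
        rw [pvRuns, ← ht_def, ← hd_def]
        refine List.Perm.trans ?_ ((hset.map (fun k => ((c :: rest).count k : Int))).symm)
        simp only [List.map_cons]
        have hfc : ((c :: rest).count c : Int) = ((t.length : Int) + 1) := by
          rw [hcount_c]; push_cast; ring
        rw [hfc, List.map_congr_left hck]
        exact List.Perm.cons _ ihd

-- (counter cs).values, spelled as the map over the distinct characters
lemma counter_values (cs : List Char) :
    (PySem.Dict.counter cs).values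
      = (PySem.Set.ofList cs).map (fun k => (cs.count k : Int)) := by
  simp only [PySem.Dict.values, PySem.Dict.items_counter, List.map_map]
  rfl

-- ===== VERDICT (by name: the statement is the Claim_ definition above) =====
theorem get_sorted_char_count_spec : Claim_equal_get_sorted_char_count := by
  intro sentence _
  unfold Spec_get_sorted_char_count get_sorted_char_count get_sorted_char_count_alt
  simp only [PySem.Dict.foldl_insert_getD_add_one_eq_counter, PySem.List.foldl_append_singleton,
    List.nil_append, counter_values]
  set cs := sentence.toList with hcs
  set ss := PySem.List.sorted cs (fun c => c) false with hss
  have hssp : ss.Pairwise (· ≤ ·) := PySem.List.sorted_pairwise cs (fun c => c)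
  have hruns := pvRuns_perm_counts ss.length ss (le_refl _) hssp
  -- runs of the sorted list ~ the counter's values
  have hsetperm : (PySem.Set.ofList ss).Perm (PySem.Set.ofList cs) := by
    rw [List.perm_ext_iff_of_nodup (PySem.Set.nodup_ofList _) (PySem.Set.nodup_ofList _)]
    intro a
    simp only [PySem.Set.mem_ofList, hss, PySem.List.mem_sorted]
  have hcounteq : ∀ k, (ss.count k : Int) = (cs.count k : Int) := by
    intro k
    have := (PySem.List.sorted_perm cs (fun c => c) false).count_eq k
    rw [← hss] at this
    exact_mod_cast this
  have hperm : (pvRuns ss).Perm ((PySem.Set.ofList cs).map (fun k => (cs.count k : Int))) := by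
    refine hruns.trans ?_
    have : (PySem.Set.ofList ss).map (fun k => (ss.count k : Int))
        = (PySem.Set.ofList ss).map (fun k => (cs.count k : Int)) :=
      List.map_congr_left (fun k _ => hcounteq k)
    rw [this]
    exact hsetperm.map _
  apply sorted_rev_eq_of_perm
  rw [pvPad_eq]
  have hlen : ((PySem.Set.ofList cs).map (fun k => (cs.count k : Int))).length
      = (pvRuns ss).length := hperm.length_eq.symm
  rw [hlen]
  exact hperm.symm.append (List.Perm.refl _)
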